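-- pv_equiv track=rewrite | github.com/aimas-upb/Change-point-detection | RunGridSearch.py | is_sep_in_range
-- ===== SOURCE A (Python) =====
-- def is_sep_in_range(current_index, SEP_indexes, match_interval):
--     for i, sep_idx in enumerate(SEP_indexes):
--         if sep_idx >= current_index:
--             if sep_idx <= current_index + match_interval:
--                 return True
--             elif i > 0 and SEP_indexes[i - 1] >= current_index - match_interval:
--                 return True
--             else:
--                 return False
--
--     if SEP_indexes and SEP_indexes[-1] >= current_index - match_interval:
--         return True
--
--     return False
-- ===== SOURCE B (Python) =====
-- def is_sep_in_range(current_index, SEP_indexes, match_interval):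
--     # Binary search (SEP_indexes nondecreasing): leftmost index with value >= current_index - match_interval,
--     # then test whether that value is <= current_index + match_interval.
--     lo_val = current_index - match_interval
--     lo, hi = 0, len(SEP_indexes)
--     while lo < hi:
--         mid = (lo + hi) // 2
--         if SEP_indexes[mid] < lo_val:
--             lo = mid + 1
--         else:
--             hi = mid
--     return lo < len(SEP_indexes) and SEP_indexes[lo] <= current_index + match_interval
-- ===== Notes on version B (the rewrite author's own statement) =====
-- stated objective: alternative
-- what changed: Replaces A's linear scan for the first SEP index >= current_index (plus predecessor/last-element checks) by a binary search for the leftmost SEP index >= current_index - match_interval; Pre_ requires the list nondecreasing (the function's contract: change-point positions in ascending order), since on unsorted lists A's value depends accidentally on which element the scan hits first.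
-- outside the precondition, e.g. on is_sep_in_range(5, [9, 0, 6], 2): A returns False, B returns True
import Mathlib
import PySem

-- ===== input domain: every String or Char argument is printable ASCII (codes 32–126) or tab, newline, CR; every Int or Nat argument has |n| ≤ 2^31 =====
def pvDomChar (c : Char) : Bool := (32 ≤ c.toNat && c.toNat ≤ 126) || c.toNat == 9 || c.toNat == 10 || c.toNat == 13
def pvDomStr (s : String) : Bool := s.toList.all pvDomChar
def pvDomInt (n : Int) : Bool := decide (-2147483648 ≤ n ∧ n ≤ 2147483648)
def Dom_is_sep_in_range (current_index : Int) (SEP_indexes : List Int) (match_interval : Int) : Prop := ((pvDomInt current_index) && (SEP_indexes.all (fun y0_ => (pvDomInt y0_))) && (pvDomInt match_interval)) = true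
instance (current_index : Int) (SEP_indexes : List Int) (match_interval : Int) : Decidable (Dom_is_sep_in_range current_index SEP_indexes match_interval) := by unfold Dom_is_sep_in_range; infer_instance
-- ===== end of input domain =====

-- B replaces A's linear scan by a binary search for the leftmost SEP index ≥ current_index - match_interval
-- (a different algorithm, valid on nondecreasing SEP_indexes, the function's intended input).

-- ===== PORT A =====
-- the for-loop over enumerate(SEP_indexes); returns none when the loop falls through
def pyLoopA (current_index : Int) (match_interval : Int) (SEP_indexes : List Int) : List (Int × Int) → Option Bool
  | [] => none
  | (i, sep_idx) :: rest =>
    if sep_idx ≥ current_index then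
      if sep_idx ≤ current_index + match_interval then some true
      -- SEP_indexes[i-1]: in range whenever i > 0, so .getD 0 is never used
      else if i > 0 ∧ (PySem.List.pyGet? SEP_indexes (i - 1)).getD 0 ≥ current_index - match_interval then some true
      else some false
    else pyLoopA current_index match_interval SEP_indexes rest

def is_sep_in_range (current_index : Int) (SEP_indexes : List Int) (match_interval : Int) : Bool :=
  match pyLoopA current_index match_interval SEP_indexes (PySem.List.enumerate SEP_indexes 0) with
  | some b => b
  | none =>
    -- SEP_indexes[-1]: in range under the nonemptiness guard, so .getD 0 is never used
    if SEP_indexes ≠ [] ∧ (PySem.List.pyGet? SEP_indexes (-1)).getD 0 ≥ current_index - match_interval then true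
    else false

-- ===== PORT B =====
-- the while-loop of Source B: leftmost index with value ≥ target, searched in [lo, hi)
def bsearchB (seps : List Int) (target : Int) (lo hi : Nat) : Nat :=
  if _h : lo < hi then
    -- mid = (lo + hi) // 2; SEP_indexes[mid]: mid < hi ≤ len(seps) at every call, so .getD 0 is never used
    if (PySem.List.pyGet? seps (((lo + hi) / 2 : Nat) : Int)).getD 0 < target then
      bsearchB seps target ((lo + hi) / 2 + 1) hi
    else
      bsearchB seps target lo ((lo + hi) / 2)
  else lo
termination_by hi - lo
decreasing_by all_goals omega

def is_sep_in_range_alt (current_index : Int) (SEP_indexes : List Int) (match_interval : Int) : Bool :=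
  let j := bsearchB SEP_indexes (current_index - match_interval) 0 SEP_indexes.length
  decide (j < SEP_indexes.length) &&
    decide ((PySem.List.pyGet? SEP_indexes ((j : Nat) : Int)).getD 0 ≤ current_index + match_interval)

-- ===== PRECONDITION & SPEC =====
-- Pre_ excludes unsorted SEP index lists, on which A still returns a value: the function's contract is a
-- list of change-point positions in ascending order, and on unsorted lists A's value depends accidentally
-- on which element its scan happens to hit first.
def Pre_is_sep_in_range (current_index : Int) (SEP_indexes : List Int) (match_interval : Int) : Prop :=
  List.Pairwise (· ≤ ·) SEP_indexes
instance (current_index : Int) (SEP_indexes : List Int) (match_interval : Int) : Decidable (Pre_is_sep_in_range current_index SEP_indexes match_interval) := by unfold Pre_is_sep_in_range; infer_instance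

def pvWitness_is_sep_in_range : Int × List Int × Int := (5, [1, 4, 9], 2)

def Spec_is_sep_in_range (current_index : Int) (SEP_indexes : List Int) (match_interval : Int) (out : Bool) : Prop := out = is_sep_in_range_alt current_index SEP_indexes match_interval
instance (current_index : Int) (SEP_indexes : List Int) (match_interval : Int) (out : Bool) : Decidable (Spec_is_sep_in_range current_index SEP_indexes match_interval out) := by unfold Spec_is_sep_in_range; infer_instance

-- ===== CLAIM (what is proved, stated in full; the proofs are below) =====
def Claim_equal_is_sep_in_range : Prop := ∀ (current_index : Int) (SEP_indexes : List Int) (match_interval : Int), Dom_is_sep_in_range current_index SEP_indexes match_interval → Pre_is_sep_in_range current_index SEP_indexes match_interval → Spec_is_sep_in_range current_index SEP_indexes match_interval (is_sep_in_range current_index SEP_indexes match_interval)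

-- ===== LEMMAS AND PROOFS =====

-- the common specification: some SEP index lies in [c-m, c+m]
def InRangeE (c m : Int) (seps : List Int) : Prop :=
  ∃ k, ∃ (_ : k < seps.length), c - m ≤ seps[k] ∧ seps[k] ≤ c + m

theorem sorted_getElem {seps : List Int} (hs : List.Pairwise (· ≤ ·) seps) :
    ∀ i j (hi : i < seps.length) (hj : j < seps.length), i ≤ j → seps[i] ≤ seps[j] := by
  intro i j hi hj hij
  rcases eq_or_lt_of_le hij with rfl | h
  · exact le_refl _
  · exact (List.pairwise_iff_getElem.mp hs) i j hi hj h

theorem loopA_spec (c m : Int) (seps : List Int)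
    (S : ∀ i j (hi : i < seps.length) (hj : j < seps.length), i ≤ j → seps[i] ≤ seps[j]) :
    ∀ fuel n, seps.length - n ≤ fuel → n ≤ seps.length →
    (∀ k (hk : k < seps.length), k < n → seps[k] < c) →
    ((pyLoopA c m seps (PySem.List.enumerate (seps.drop n) ((n : Nat) : Int)) = some true → InRangeE c m seps)
    ∧ (pyLoopA c m seps (PySem.List.enumerate (seps.drop n) ((n : Nat) : Int)) = some false → ¬ InRangeE c m seps)
    ∧ (pyLoopA c m seps (PySem.List.enumerate (seps.drop n) ((n : Nat) : Int)) = none → ∀ k (hk : k < seps.length), seps[k] < c)) := by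
  intro fuel
  induction fuel with
  | zero =>
    intro n hfuel hn hpre
    have hlen : n = seps.length := by omega
    subst hlen
    rw [List.drop_length, PySem.List.enumerate_nil]
    exact ⟨fun h => by simp [pyLoopA] at h, fun h => by simp [pyLoopA] at h, fun _ k hk => hpre k hk hk⟩
  | succ f ih =>
    intro n hfuel hn hpre
    rcases eq_or_lt_of_le hn with heq | hlt
    · subst heq
      rw [List.drop_length, PySem.List.enumerate_nil]
      exact ⟨fun h => by simp [pyLoopA] at h, fun h => by simp [pyLoopA] at h, fun _ k hk => hpre k hk hk⟩
    · have hdrop : seps.drop n = seps[n] :: seps.drop (n + 1) := List.drop_eq_getElem_cons hlt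
      rw [hdrop, PySem.List.enumerate_cons]
      by_cases hge : seps[n] ≥ c
      · by_cases hle : seps[n] ≤ c + m
        · -- first return True
          simp only [pyLoopA, hge, hle, if_pos]
          refine ⟨fun _ => ⟨n, hlt, by omega, hle⟩, fun h => by simp at h, fun h => by simp at h⟩
        · by_cases helif : ((n : Nat) : Int) > 0 ∧ (PySem.List.pyGet? seps (((n : Nat) : Int) - 1)).getD 0 ≥ c - m
          · -- second return True: predecessor is in range
            have hn0 : 0 < n := by exact_mod_cast helif.1
            have hcast : ((n : Nat) : Int) - 1 = ((n - 1 : Nat) : Int) := by omega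
            have hprev : (PySem.List.pyGet? seps (((n : Nat) : Int) - 1)).getD 0 = seps[n-1]'(by omega) := by
              rw [hcast, PySem.List.pyGet?_natCast]
              simp [List.getElem?_eq_getElem (show n - 1 < seps.length by omega)]
            have hprevlt : seps[n-1]'(by omega) < c := hpre (n-1) (by omega) (by omega)
            have hprevge : c - m ≤ seps[n-1]'(by omega) := by rw [hprev] at helif; exact helif.2
            simp only [pyLoopA, hge, hle, helif, if_pos]
            refine ⟨fun _ => ⟨n - 1, by omega, hprevge, by omega⟩, fun h => by simp at h, fun h => by simp at h⟩
          · -- return False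
            simp only [pyLoopA, hge, if_pos, hle, helif]
            simp only [ite_false]
            refine ⟨fun h => by simp at h, fun _ => ?_, fun h => by simp at h⟩
            rintro ⟨k, hk, hkl, hku⟩
            by_cases hkn : k < n
            · -- k is before the scan position: n > 0 and seps[n-1] < c - m
              have hn0 : 0 < n := by omega
              have hnpos : ((n : Nat) : Int) > 0 := by exact_mod_cast hn0
              have hcast : ((n : Nat) : Int) - 1 = ((n - 1 : Nat) : Int) := by omega
              have hprev : (PySem.List.pyGet? seps (((n : Nat) : Int) - 1)).getD 0 = seps[n-1]'(by omega) := by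
                rw [hcast, PySem.List.pyGet?_natCast]
                simp [List.getElem?_eq_getElem (show n - 1 < seps.length by omega)]
              have hprevlt : seps[n-1]'(by omega) < c - m := by
                by_contra hcon
                exact helif ⟨hnpos, by rw [hprev]; omega⟩
              have := S k (n-1) hk (by omega) (by omega)
              omega
            · have := S n k hlt hk (by omega)
              omega
      · -- element below current_index: continue the loop
        have hlt' : seps[n] < c := by omega
        simp only [pyLoopA, hge]
        have : ((n : Nat) : Int) + 1 = (((n + 1 : Nat)) : Int) := by push_cast; ring
        rw [this]
        refine ih (n + 1) (by omega) (by omega) ?_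
        intro k hk hkn
        rcases Nat.lt_succ_iff_lt_or_eq.mp hkn with h | h
        · exact hpre k hk h
        · subst h; exact hlt'

theorem A_true_iff (c m : Int) (seps : List Int) (hs : List.Pairwise (· ≤ ·) seps) :
    (is_sep_in_range c seps m = true ↔ InRangeE c m seps) := by
  have S := sorted_getElem hs
  have hmain := loopA_spec c m seps S seps.length 0 (by omega) (by omega) (by omega)
  rw [List.drop_zero] at hmain
  unfold is_sep_in_range
  have h0 : ((0 : Nat) : Int) = (0 : Int) := by norm_num
  rw [h0] at hmain
  rcases hres : pyLoopA c m seps (PySem.List.enumerate seps 0) with _ | b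
  · -- loop fell through: every element < c
    have hall := hmain.2.2 hres
    show (if seps ≠ [] ∧ (PySem.List.pyGet? seps (-1)).getD 0 ≥ c - m then true else false) = true ↔ InRangeE c m seps
    by_cases hne : seps ≠ [] ∧ (PySem.List.pyGet? seps (-1)).getD 0 ≥ c - m
    · rw [if_pos hne]
      obtain ⟨hne1, hlast⟩ := hne
      have hlen : 0 < seps.length := List.length_pos_iff.mpr hne1
      have hget : (PySem.List.pyGet? seps (-1)).getD 0 = seps[seps.length - 1]'(by omega) := by
        rw [PySem.List.pyGet?_neg_one, List.getLast?_eq_getElem?]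
        simp [List.getElem?_eq_getElem (show seps.length - 1 < seps.length by omega)]
      rw [hget] at hlast
      have hlt := hall (seps.length - 1) (by omega)
      exact ⟨fun _ => ⟨seps.length - 1, by omega, by omega, by omega⟩, fun _ => rfl⟩
    · rw [if_neg hne]
      constructor
      · intro h; simp at h
      · rintro ⟨k, hk, hkl, hku⟩
        exfalso
        have hlt := hall k hk
        have hne1 : seps ≠ [] := by intro h; subst h; simp at hk
        have hlen : 0 < seps.length := List.length_pos_iff.mpr hne1
        have hget : (PySem.List.pyGet? seps (-1)).getD 0 = seps[seps.length - 1]'(by omega) := by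
          rw [PySem.List.pyGet?_neg_one, List.getLast?_eq_getElem?]
          simp [List.getElem?_eq_getElem (show seps.length - 1 < seps.length by omega)]
        have hmono := S k (seps.length - 1) hk (by omega) (by omega)
        exact hne ⟨hne1, by rw [hget]; omega⟩
  · show b = true ↔ InRangeE c m seps
    cases b
    · exact ⟨fun h => by simp at h, fun h => absurd h (hmain.2.1 hres)⟩
    · exact ⟨fun _ => hmain.1 hres, fun _ => rfl⟩

theorem bsearch_spec (seps : List Int) (target : Int)
    (S : ∀ i j (hi : i < seps.length) (hj : j < seps.length), i ≤ j → seps[i] ≤ seps[j]) :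
    ∀ lo hi, ∀ (hhi : hi ≤ seps.length), ∀ (_hlohi : lo ≤ hi),
    lo ≤ bsearchB seps target lo hi ∧ bsearchB seps target lo hi ≤ hi ∧
    (∀ k (hk : k < seps.length), lo ≤ k → k < bsearchB seps target lo hi → seps[k] < target) ∧
    (∀ k (hk : k < seps.length), k = bsearchB seps target lo hi → bsearchB seps target lo hi < hi →
      target ≤ seps[k]) := by
  intro lo hi
  induction lo, hi using bsearchB.induct seps target with
  | case1 lo hi hlt hcond ih =>
    intro hhi hlohi
    have hmid : (lo + hi) / 2 < seps.length := by omega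
    have hget : (PySem.List.pyGet? seps (((lo + hi) / 2 : Nat) : Int)).getD 0 = seps[(lo + hi) / 2] := by
      rw [PySem.List.pyGet?_natCast]; simp [List.getElem?_eq_getElem hmid]
    rw [hget] at hcond
    have hrec : bsearchB seps target lo hi = bsearchB seps target ((lo + hi) / 2 + 1) hi := by
      rw [bsearchB, dif_pos hlt, if_pos (by rw [hget]; exact hcond)]
    obtain ⟨h1, h2, h3, h4⟩ := ih hhi (by omega)
    rw [hrec]
    refine ⟨by omega, h2, ?_, h4⟩
    intro k hk hlok hkr
    by_cases hkm : (lo + hi) / 2 + 1 ≤ k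
    · exact h3 k hk hkm hkr
    · calc seps[k] ≤ seps[(lo + hi) / 2] := S k ((lo + hi) / 2) hk hmid (by omega)
        _ < target := hcond
  | case2 lo hi hlt hcond ih =>
    intro hhi hlohi
    have hmid : (lo + hi) / 2 < seps.length := by omega
    have hget : (PySem.List.pyGet? seps (((lo + hi) / 2 : Nat) : Int)).getD 0 = seps[(lo + hi) / 2] := by
      rw [PySem.List.pyGet?_natCast]; simp [List.getElem?_eq_getElem hmid]
    rw [hget] at hcond
    have hrec : bsearchB seps target lo hi = bsearchB seps target lo ((lo + hi) / 2) := by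
      rw [bsearchB, dif_pos hlt, if_neg (by rw [hget]; exact hcond)]
    obtain ⟨h1, h2, h3, h4⟩ := ih (by omega) (by omega)
    rw [hrec]
    refine ⟨h1, by omega, h3, ?_⟩
    intro k hk hkeq hlt'
    rcases eq_or_lt_of_le h2 with heq | hltm
    · have hkm : k = (lo + hi) / 2 := by omega
      subst hkm
      omega
    · exact h4 k hk hkeq hltm
  | case3 lo hi hnlt =>
    intro hhi hlohi
    have hres : bsearchB seps target lo hi = lo := by rw [bsearchB, dif_neg hnlt]
    rw [hres]
    exact ⟨le_refl _, hlohi, fun k hk h1 h2 => by omega, fun k hk h1 h2 => by omega⟩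

theorem B_true_iff (c m : Int) (seps : List Int) (hs : List.Pairwise (· ≤ ·) seps) :
    (is_sep_in_range_alt c seps m = true ↔ InRangeE c m seps) := by
  have S := sorted_getElem hs
  obtain ⟨h1, h2, h3, h4⟩ := bsearch_spec seps (c - m) S 0 seps.length (le_refl _) (by omega)
  set r := bsearchB seps (c - m) 0 seps.length with hr
  unfold is_sep_in_range_alt
  rw [← hr]
  constructor
  · intro h
    simp only [Bool.and_eq_true, decide_eq_true_eq] at h
    obtain ⟨hrlen, hle⟩ := h
    have hget : (PySem.List.pyGet? seps ((r : Nat) : Int)).getD 0 = seps[r]'hrlen := by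
      rw [PySem.List.pyGet?_natCast]; simp [List.getElem?_eq_getElem hrlen]
    rw [hget] at hle
    exact ⟨r, hrlen, h4 r hrlen rfl hrlen, hle⟩
  · rintro ⟨k, hk, hkl, hku⟩
    have hrk : r ≤ k := by
      by_contra hcon
      have := h3 k hk (by omega) (by omega)
      omega
    have hrlen : r < seps.length := by omega
    have hget : (PySem.List.pyGet? seps ((r : Nat) : Int)).getD 0 = seps[r]'hrlen := by
      rw [PySem.List.pyGet?_natCast]; simp [List.getElem?_eq_getElem hrlen]
    have hmono := S r k hrlen hk hrk
    simp only [Bool.and_eq_true, decide_eq_true_eq]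
    exact ⟨hrlen, by rw [hget]; omega⟩

-- ===== VERDICT (by name: the statement is the Claim_ definition above) =====
theorem is_sep_in_range_spec : Claim_equal_is_sep_in_range := by
  intro c seps m _hdom hpre
  unfold Spec_is_sep_in_range
  have hA := A_true_iff c m seps hpre
  have hB := B_true_iff c m seps hpre
  rw [Bool.eq_iff_iff, hA, hB]
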